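-- pv_equiv track=rewrite | github.com/IvanRenison/ProgrammingProblems | 2021-2022 ACM-ICPC Brazil Subregional Programming Contest/C.py | solve
-- ===== SOURCE A (Python) =====
-- from typing import List, Tuple
--
-- def solve(B: int, Ds: List[int]) -> Tuple[int, int]:
--     L = len(Ds)
--     number: int = 0
--     for j, d in enumerate(Ds):
--         number += d * B ** (L - 1 - j)
--
--     rem: int = number % (B+1)
--
--     if rem == 0:
--         return 0, 0
--
--     for j, d in enumerate(Ds):
--         i = L - 1 - j
--         if i % 2 == 0:
--             new_d: int = d - rem
--             if new_d >= 0: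
--                 return j+1, new_d
--         else:
--             new_d: int = d - (B + 1 - rem)
--             if new_d >= 0:
--                 return j+1, new_d
--
--     return -1, -1
-- ===== SOURCE B (Python) =====
-- def solve(B, Ds):
--     # B == -1 (mod B+1), so the big number's remainder is the alternating
--     # digit sum's remainder: no big-integer powers needed.
--     M = B + 1
--     acc = 0
--     for d in Ds:
--         acc = d - acc  # after the loop: d[L-1] - d[L-2] + ... = sum d[j]*(-1)**(L-1-j)
--     rem = acc % M
--     if rem == 0:
--         return 0, 0
--     L = len(Ds)
--     for j, d in enumerate(Ds):
--         cut = rem if (L - 1 - j) % 2 == 0 else M - rem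
--         if d >= cut:
--             return j + 1, d - cut
--     return -1, -1
-- ===== Notes on version B (the rewrite author's own statement) =====
-- stated objective: faster
-- what changed: replaces the O(L^2)-bit big-integer power sum d*B**(L-1-j) by a one-pass alternating-sum accumulator (B = -1 mod B+1), keeping all arithmetic word-sized, and folds the two parity branches of the digit-adjustment scan into one comparison
-- outside the precondition, e.g. on solve(-1, [1, 2]): A raises ZeroDivisionError, B raises ZeroDivisionError
import Mathlib
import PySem

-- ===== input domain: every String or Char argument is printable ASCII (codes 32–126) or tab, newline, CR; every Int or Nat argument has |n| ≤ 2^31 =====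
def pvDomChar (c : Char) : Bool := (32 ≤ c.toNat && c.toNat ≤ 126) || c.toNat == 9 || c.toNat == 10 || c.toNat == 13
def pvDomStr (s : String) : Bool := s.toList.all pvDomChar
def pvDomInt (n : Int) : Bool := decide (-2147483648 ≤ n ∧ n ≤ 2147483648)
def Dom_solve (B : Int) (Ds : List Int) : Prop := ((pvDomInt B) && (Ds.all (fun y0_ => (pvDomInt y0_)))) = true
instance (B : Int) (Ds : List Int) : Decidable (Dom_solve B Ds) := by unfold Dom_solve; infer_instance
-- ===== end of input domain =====

-- B computes the remainder by a one-pass alternating digit sum (B ≡ -1 mod B+1)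
-- instead of A's big-integer power sum; measurably faster on long digit lists.

-- ===== PORT A =====
-- first loop: number += d * B ** (L - 1 - j)   (exponent L-1-j is ≥ 0 on every call, so Int ^ Nat is exact)
def powLoop (B L : Int) : List Int → Int → Int → Int
  | [], _, number => number
  | d :: rest, j, number => powLoop B L rest (j + 1) (number + d * B ^ (L - 1 - j).toNat)

-- second loop of A, with its two parity branches
def searchA (B rem L : Int) : List Int → Int → Int × Int
  | [], _ => (-1, -1)
  | d :: rest, j =>
    let i := L - 1 - j
    if PySem.Int.mod i 2 = 0 then
      let nd := d - rem
      if nd ≥ 0 then (j + 1, nd) else searchA B rem L rest (j + 1)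
    else
      let nd := d - (B + 1 - rem)
      if nd ≥ 0 then (j + 1, nd) else searchA B rem L rest (j + 1)

def solve (B : Int) (Ds : List Int) : Int × Int :=
  let L : Int := Ds.length
  let number := powLoop B L Ds 0 0
  let rem := PySem.Int.mod number (B + 1)
  if rem = 0 then (0, 0) else searchA B rem L Ds 0

-- ===== PORT B =====
-- B's search loop: one comparison, the cut chosen by parity
def searchB (M rem L : Int) : List Int → Int → Int × Int
  | [], _ => (-1, -1)
  | d :: rest, j =>
    let cut := if PySem.Int.mod (L - 1 - j) 2 = 0 then rem else M - rem
    if d ≥ cut then (j + 1, d - cut) else searchB M rem L rest (j + 1)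

def solve_alt (B : Int) (Ds : List Int) : Int × Int :=
  let M := B + 1
  let acc := Ds.foldl (fun a d => d - a) 0
  let rem := PySem.Int.mod acc M
  if rem = 0 then (0, 0) else searchB M rem (Ds.length : Int) Ds 0

-- ===== PRECONDITION & SPEC =====
-- Pre_ excludes only B = -1, where A's 'number % (B+1)' raises ZeroDivisionError (B raises there too).
def Pre_solve (B : Int) (Ds : List Int) : Prop := B ≠ -1
instance (B : Int) (Ds : List Int) : Decidable (Pre_solve B Ds) := by unfold Pre_solve; infer_instance
def pvWitness_solve : Int × List Int := (10, [1, 2, 3])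
def Spec_solve (B : Int) (Ds : List Int) (out : Int × Int) : Prop := out = solve_alt B Ds
instance (B : Int) (Ds : List Int) (out : Int × Int) : Decidable (Spec_solve B Ds out) := by unfold Spec_solve; infer_instance

-- ===== CLAIM (what is proved, stated in full; the proofs are below) =====
def Claim_equal_solve : Prop := ∀ (B : Int) (Ds : List Int), Dom_solve B Ds → Pre_solve B Ds → Spec_solve B Ds (solve B Ds)

-- ===== LEMMAS AND PROOFS =====

-- Python % is determined by floor-division and its remainder bounds; two Ints congruent mod M have the same Python remainder.
theorem pymod_congr (a b M : Int) (hM : M ≠ 0) (hd : M ∣ (a - b)) :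
    PySem.Int.mod a M = PySem.Int.mod b M := by
  have ha := PySem.Int.floordiv_mul_add_mod a M
  have hb := PySem.Int.floordiv_mul_add_mod b M
  have hdr : M ∣ (PySem.Int.mod a M - PySem.Int.mod b M) := by
    obtain ⟨k, hk⟩ := hd
    exact ⟨k - PySem.Int.floordiv a M + PySem.Int.floordiv b M, by nlinarith [ha, hb, hk]⟩
  have hz : PySem.Int.mod a M - PySem.Int.mod b M = 0 := by
    rcases lt_or_gt_of_ne hM with hneg | hpos
    · have b1 := PySem.Int.mod_neg_bounds a hneg
      have b2 := PySem.Int.mod_neg_bounds b hneg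
      refine Int.eq_zero_of_abs_lt_dvd (neg_dvd.mpr hdr) ?_
      rw [abs_lt]; omega
    · have b1a := PySem.Int.mod_nonneg a hpos
      have b1b := PySem.Int.mod_lt a hpos
      have b2a := PySem.Int.mod_nonneg b hpos
      have b2b := PySem.Int.mod_lt b hpos
      refine Int.eq_zero_of_abs_lt_dvd hdr ?_
      rw [abs_lt]; omega
  omega

theorem dvd_pow_sub_negone (B : Int) (s : Nat) : (B + 1) ∣ (B ^ s - (-1) ^ s) := by
  induction s with
  | zero => simp
  | succ n ih =>
    have : B ^ (n+1) - (-1) ^ (n+1) = B * (B ^ n - (-1) ^ n) + (-1) ^ n * (B + 1) := by ring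
    rw [this]
    exact dvd_add (Dvd.dvd.mul_left ih B) (Dvd.dvd.mul_left dvd_rfl _)

-- loop invariant: A's power sum and B's alternating fold stay congruent mod B+1
theorem powLoop_congr (B L : Int) :
    ∀ (ds : List Int) (j a b : Int), L = j + ds.length →
      (B + 1) ∣ (a - (-1) ^ ds.length * b) →
      (B + 1) ∣ (powLoop B L ds j a - ds.foldl (fun x d => d - x) b) := by
  intro ds
  induction ds with
  | nil => intro j a b _ h; simpa using h
  | cons d rest ih =>
    intro j a b hL h
    show (B + 1) ∣ (powLoop B L rest (j + 1) (a + d * B ^ (L - 1 - j).toNat)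
        - rest.foldl (fun x d => d - x) (d - b))
    have hexp : (L - 1 - j).toNat = rest.length := by
      simp [List.length_cons] at hL; omega
    refine ih (j + 1) _ _ (by simp [List.length_cons] at hL ⊢; omega) ?_
    rw [hexp]
    have key : a + d * B ^ rest.length - (-1) ^ rest.length * (d - b)
        = (a - (-1) ^ (rest.length + 1) * b) + d * (B ^ rest.length - (-1) ^ rest.length) := by
      ring
    rw [key]
    exact dvd_add (by simpa [List.length_cons] using h)
      (Dvd.dvd.mul_left (dvd_pow_sub_negone B rest.length) d)

theorem search_eq (B rem L : Int) :
    ∀ (ds : List Int) (j : Int), searchA B rem L ds j = searchB (B + 1) rem L ds j := by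
  intro ds
  induction ds with
  | nil => intro j; rfl
  | cons d rest ih =>
    intro j
    show (if PySem.Int.mod (L - 1 - j) 2 = 0 then
            if d - rem ≥ 0 then (j + 1, d - rem) else searchA B rem L rest (j + 1)
          else
            if d - (B + 1 - rem) ≥ 0 then (j + 1, d - (B + 1 - rem)) else searchA B rem L rest (j + 1))
        = (if d ≥ (if PySem.Int.mod (L - 1 - j) 2 = 0 then rem else B + 1 - rem) then
            (j + 1, d - (if PySem.Int.mod (L - 1 - j) 2 = 0 then rem else B + 1 - rem))
          else searchB (B + 1) rem L rest (j + 1))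
    split_ifs with h1 h2 h3 h4 h5 <;> first
      | rfl
      | exact ih (j + 1)
      | omega

-- ===== VERDICT (by name: the statement is the Claim_ definition above) =====
theorem solve_spec : Claim_equal_solve := by
  intro B Ds _ hpre
  unfold Spec_solve solve solve_alt
  have hM : B + 1 ≠ 0 := by unfold Pre_solve at hpre; omega
  have hdvd : (B + 1) ∣ (powLoop B (Ds.length : Int) Ds 0 0 - Ds.foldl (fun x d => d - x) 0) :=
    powLoop_congr B _ Ds 0 0 0 (by simp) (by simp)
  have hrem : PySem.Int.mod (powLoop B (Ds.length : Int) Ds 0 0) (B + 1)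
      = PySem.Int.mod (Ds.foldl (fun x d => d - x) 0) (B + 1) := pymod_congr _ _ _ hM hdvd
  simp only [hrem]
  split_ifs with h
  · rfl
  · exact search_eq B _ _ Ds 0
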